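-- pv_equiv track=rewrite | github.com/mirzadm/leetcode | src/p0188_buy_sell_stocks_iv.py | parse_intervals
-- ===== SOURCE A (Python) =====
-- from typing import List, Tuple
--
-- def parse_intervals(prices: List[int]) -> List[Tuple[int]]:
--     """Parses prices into ascending price intervals."""
--     i = 0
--     price_intervals = []
--     while i < len(prices) - 1:
--         while i < len(prices) - 1 and prices[i] >= prices[i + 1]:
--             i += 1
--         left = i
--         while i < len(prices) - 1 and prices[i] < prices[i + 1]:
--             i += 1
--         right = i
--         if left < right:
--             price_intervals.append((prices[left], prices[right]))
--     return price_intervals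
-- ===== SOURCE B (Python) =====
-- from typing import List, Tuple
--
-- def parse_intervals(prices: List[int]) -> List[Tuple[int]]:
--     """Parses prices into ascending price intervals (single linear pass)."""
--     intervals = []
--     start = None  # index where the current strictly-ascending run began
--     for i in range(1, len(prices)):
--         if prices[i] > prices[i - 1]:
--             if start is None:
--                 start = i - 1
--         elif start is not None:
--             intervals.append((prices[start], prices[i - 1]))
--             start = None
--     if start is not None:
--         intervals.append((prices[start], prices[-1]))
--     return intervals
-- ===== Notes on version B (the rewrite author's own statement) =====
-- stated objective: simpler
-- what changed: Replaced A's nested skip-then-climb while loops over a manually advanced index with a single linear for-pass that keeps one piece of state, the index where the current strictly-ascending run began, flushing an interval when the run ends and once after the loop.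
import Mathlib
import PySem

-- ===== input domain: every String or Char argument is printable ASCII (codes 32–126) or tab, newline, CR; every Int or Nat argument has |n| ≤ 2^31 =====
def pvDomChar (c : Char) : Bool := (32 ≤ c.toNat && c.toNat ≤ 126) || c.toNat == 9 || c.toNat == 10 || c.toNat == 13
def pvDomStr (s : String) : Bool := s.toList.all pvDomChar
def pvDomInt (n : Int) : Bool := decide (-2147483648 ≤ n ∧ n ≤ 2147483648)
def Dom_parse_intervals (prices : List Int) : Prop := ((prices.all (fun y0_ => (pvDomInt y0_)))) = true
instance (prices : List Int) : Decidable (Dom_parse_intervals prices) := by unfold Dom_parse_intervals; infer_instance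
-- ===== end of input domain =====

-- B replaces A's nested skip-then-climb while loops by a single linear pass that
-- tracks the index where the current strictly-ascending run began (objective: simpler).

-- ===== PORT A =====
-- all list accesses below are guarded in range by the loop conditions, so getD is exact;
-- the while loops are ported with a fuel argument (prices.length bounds their iteration count)

-- inner loop 1: 'while i < len(prices) - 1 and prices[i] >= prices[i + 1]: i += 1'
def skipA (prices : List Int) : Nat → Nat → Nat
  | 0, i => i
  | fuel + 1, i =>
    if i < prices.length - 1 ∧ prices.getD (i+1) 0 ≤ prices.getD i 0 then
      skipA prices fuel (i+1)
    else i

-- inner loop 2: 'while i < len(prices) - 1 and prices[i] < prices[i + 1]: i += 1'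
def climbA (prices : List Int) : Nat → Nat → Nat
  | 0, i => i
  | fuel + 1, i =>
    if i < prices.length - 1 ∧ prices.getD i 0 < prices.getD (i+1) 0 then
      climbA prices fuel (i+1)
    else i

-- outer loop of A, accumulating price_intervals
def outerA (prices : List Int) : Nat → Nat → List (Int × Int) → List (Int × Int)
  | 0, _, acc => acc
  | fuel + 1, i, acc =>
    if i < prices.length - 1 then
      let left := skipA prices prices.length i
      let right := climbA prices prices.length left
      outerA prices fuel right
        (if left < right then acc ++ [(prices.getD left 0, prices.getD right 0)] else acc)
    else acc

def parse_intervals (prices : List Int) : List (Int × Int) :=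
  outerA prices prices.length 0 []

-- ===== PORT B =====
-- loop body of Source B: state = (intervals, start), loop variable i over range(1, len(prices))
def stepB (prices : List Int) (st : List (Int × Int) × Option Int) (i : Int) :
    List (Int × Int) × Option Int :=
  if PySem.List.pyGetD prices (i-1) 0 < PySem.List.pyGetD prices i 0 then
    match st.2 with
    | none => (st.1, some (i-1))
    | some _ => st
  else
    match st.2 with
    | some s => (st.1 ++ [(PySem.List.pyGetD prices s 0, PySem.List.pyGetD prices (i-1) 0)], none)
    | none => st

def parse_intervals_alt (prices : List Int) : List (Int × Int) :=
  let st := (PySem.List.pyRange 1 (prices.length : Int) 1).foldl (stepB prices) ([], none)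
  match st.2 with
  | some s => st.1 ++ [(PySem.List.pyGetD prices s 0, PySem.List.pyGetD prices (-1) 0)]
  | none => st.1

-- ===== PRECONDITION & SPEC =====
def Spec_parse_intervals (prices : List Int) (out : List (Int × Int)) : Prop := out = parse_intervals_alt prices
instance (prices : List Int) (out : List (Int × Int)) : Decidable (Spec_parse_intervals prices out) := by unfold Spec_parse_intervals; infer_instance

-- ===== CLAIM (what is proved, stated in full; the proofs are below) =====
def Claim_equal_parse_intervals : Prop := ∀ (prices : List Int), Dom_parse_intervals prices → Spec_parse_intervals prices (parse_intervals prices)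

-- ===== LEMMAS AND PROOFS =====

-- flush of Source B's final 'if start is not None'
def flushB (prices : List Int) (st : List (Int × Int) × Option Int) : List (Int × Int) :=
  match st.2 with
  | some s => st.1 ++ [(PySem.List.pyGetD prices s 0, PySem.List.pyGetD prices (-1) 0)]
  | none => st.1

theorem parse_intervals_alt_eq_flush (prices : List Int) :
    parse_intervals_alt prices =
      flushB prices ((PySem.List.pyRange 1 (prices.length : Int) 1).foldl (stepB prices) ([], none)) := by
  rfl

theorem stepB_natCast (prices : List Int) (st : List (Int × Int) × Option Int) (k : Nat) :
    stepB prices st ((k : Int) + 1) =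
      if prices.getD k 0 < prices.getD (k+1) 0 then
        match st.2 with
        | none => (st.1, some (k : Int))
        | some _ => st
      else
        match st.2 with
        | some s => (st.1 ++ [(PySem.List.pyGetD prices s 0, prices.getD k 0)], none)
        | none => st := by
  have e1 : ((k : Int) + 1) - 1 = ((k : Nat) : Int) := by push_cast; ring
  have e2 : ((k : Int) + 1) = (((k + 1 : Nat)) : Int) := by push_cast; ring
  unfold stepB
  rw [e1, e2]
  simp only [PySem.List.pyGetD_natCast]

-- a non-ascending segment leaves state (acc, none) unchanged
theorem skip_seg (prices : List Int) (acc : List (Int × Int)) (a b : Nat) (hab : a ≤ b)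
    (h : ∀ k, a ≤ k → k < b → prices.getD (k+1) 0 ≤ prices.getD k 0) :
    (PySem.List.pyRange ((a : Int) + 1) ((b : Int) + 1) 1).foldl (stepB prices) (acc, none) =
      (acc, none) := by
  obtain ⟨m, rfl⟩ : ∃ m, b = a + m := ⟨b - a, by omega⟩
  clear hab
  induction m generalizing a with
  | zero => rw [PySem.List.pyRange_one_eq_nil (by omega)]; rfl
  | succ m ih =>
    rw [PySem.List.pyRange_one_cons (by push_cast; omega)]
    simp only [List.foldl_cons]
    rw [stepB_natCast]
    have hna : ¬ prices.getD a 0 < prices.getD (a+1) 0 := by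
      have := h a (le_refl _) (by omega); omega
    simp only [hna, if_false]
    have : ((a:Int) + 1 + 1) = ((a+1 : Nat) : Int) + 1 := by push_cast; ring
    rw [this]
    have : ((a + (m+1) : Nat) : Int) + 1 = ((a + 1 + m : Nat) : Int) + 1 := by push_cast; ring
    rw [this]
    exact ih (a+1) (fun k hk1 hk2 => h k (by omega) (by omega))

-- a strictly-ascending segment leaves state (acc, some s) unchanged
theorem climb_seg (prices : List Int) (acc : List (Int × Int)) (s : Int) (a b : Nat) (hab : a ≤ b)
    (h : ∀ k, a ≤ k → k < b → prices.getD k 0 < prices.getD (k+1) 0) :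
    (PySem.List.pyRange ((a : Int) + 1) ((b : Int) + 1) 1).foldl (stepB prices) (acc, some s) =
      (acc, some s) := by
  obtain ⟨m, rfl⟩ : ∃ m, b = a + m := ⟨b - a, by omega⟩
  clear hab
  induction m generalizing a with
  | zero => rw [PySem.List.pyRange_one_eq_nil (by omega)]; rfl
  | succ m ih =>
    rw [PySem.List.pyRange_one_cons (by push_cast; omega)]
    simp only [List.foldl_cons]
    rw [stepB_natCast]
    have ha : prices.getD a 0 < prices.getD (a+1) 0 := h a (le_refl _) (by omega)
    simp only [ha, if_true]
    have : ((a:Int) + 1 + 1) = ((a+1 : Nat) : Int) + 1 := by push_cast; ring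
    rw [this]
    have : ((a + (m+1) : Nat) : Int) + 1 = ((a + 1 + m : Nat) : Int) + 1 := by push_cast; ring
    rw [this]
    exact ih (a+1) (fun k hk1 hk2 => h k (by omega) (by omega))

theorem pyGetD_last (prices : List Int) (h : 1 ≤ prices.length) :
    PySem.List.pyGetD prices (-1) 0 = prices.getD (prices.length - 1) 0 := by
  have hne : prices ≠ [] := by
    intro hh; subst hh; simp at h
  rw [PySem.List.pyGetD_neg_one prices 0 hne]
  rw [List.getLast_eq_getElem]
  rw [List.getD_eq_getElem prices 0 (by omega)]

-- facts about A's inner loops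
theorem skipA_ge (prices : List Int) (fuel i : Nat) : i ≤ skipA prices fuel i := by
  induction fuel generalizing i with
  | zero => simp [skipA]
  | succ f ih =>
    rw [skipA]
    split_ifs with hc
    · have := ih (i+1); omega
    · exact le_refl i

theorem skipA_le (prices : List Int) (fuel i : Nat) (h : i ≤ prices.length - 1) :
    skipA prices fuel i ≤ prices.length - 1 := by
  induction fuel generalizing i with
  | zero => simpa [skipA] using h
  | succ f ih =>
    rw [skipA]
    split_ifs with hc
    · exact ih (i+1) (by omega)
    · exact h

theorem skipA_stop (prices : List Int) (fuel i : Nat)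
    (hf : prices.length - 1 ≤ i + fuel)
    (h : skipA prices fuel i < prices.length - 1) :
    prices.getD (skipA prices fuel i) 0 < prices.getD (skipA prices fuel i + 1) 0 := by
  induction fuel generalizing i with
  | zero => simp only [skipA] at h ⊢; omega
  | succ f ih =>
    rw [skipA] at h ⊢
    split_ifs at h ⊢ with hc
    · exact ih (i+1) (by omega) h
    · by_contra hcon; exact hc ⟨h, by omega⟩

theorem skipA_all (prices : List Int) (fuel i : Nat) :
    ∀ k, i ≤ k → k < skipA prices fuel i → prices.getD (k+1) 0 ≤ prices.getD k 0 := by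
  induction fuel generalizing i with
  | zero => simp only [skipA]; intro k hk1 hk2; omega
  | succ f ih =>
    rw [skipA]
    split_ifs with hc
    · intro k hk1 hk2
      rcases Nat.eq_or_lt_of_le hk1 with rfl | hlt
      · exact hc.2
      · exact ih (i+1) k hlt hk2
    · intro k hk1 hk2; omega

theorem climbA_ge (prices : List Int) (fuel i : Nat) : i ≤ climbA prices fuel i := by
  induction fuel generalizing i with
  | zero => simp [climbA]
  | succ f ih =>
    rw [climbA]
    split_ifs with hc
    · have := ih (i+1); omega
    · exact le_refl i

theorem climbA_le (prices : List Int) (fuel i : Nat) (h : i ≤ prices.length - 1) :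
    climbA prices fuel i ≤ prices.length - 1 := by
  induction fuel generalizing i with
  | zero => simpa [climbA] using h
  | succ f ih =>
    rw [climbA]
    split_ifs with hc
    · exact ih (i+1) (by omega)
    · exact h

theorem climbA_stop (prices : List Int) (fuel i : Nat)
    (hf : prices.length - 1 ≤ i + fuel)
    (h : climbA prices fuel i < prices.length - 1) :
    prices.getD (climbA prices fuel i + 1) 0 ≤ prices.getD (climbA prices fuel i) 0 := by
  induction fuel generalizing i with
  | zero => simp only [climbA] at h ⊢; omega
  | succ f ih =>
    rw [climbA] at h ⊢
    split_ifs at h ⊢ with hc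
    · exact ih (i+1) (by omega) h
    · by_contra hcon; exact hc ⟨h, by omega⟩

theorem climbA_all (prices : List Int) (fuel i : Nat) :
    ∀ k, i ≤ k → k < climbA prices fuel i → prices.getD k 0 < prices.getD (k+1) 0 := by
  induction fuel generalizing i with
  | zero => simp only [climbA]; intro k hk1 hk2; omega
  | succ f ih =>
    rw [climbA]
    split_ifs with hc
    · intro k hk1 hk2
      rcases Nat.eq_or_lt_of_le hk1 with rfl | hlt
      · exact hc.2
      · exact ih (i+1) k hlt hk2
    · intro k hk1 hk2; omega

theorem climbA_gt (prices : List Int) (fuel i : Nat)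
    (hf : prices.length - 1 ≤ i + fuel)
    (h1 : i < prices.length - 1) (h2 : prices.getD i 0 < prices.getD (i+1) 0) :
    i < climbA prices fuel i := by
  cases fuel with
  | zero => simp only [climbA]; omega
  | succ f =>
    rw [climbA, if_pos (And.intro h1 h2)]
    have := climbA_ge prices f (i+1)
    omega

theorem outer_progress (prices : List Int) (f i : Nat)
    (hf : prices.length - 1 ≤ i + f) (h : i < prices.length - 1) :
    i < climbA prices f (skipA prices f i) := by
  have hge := skipA_ge prices f i
  by_cases hl : skipA prices f i < prices.length - 1
  · have := climbA_gt prices f (skipA prices f i) (by omega) hl (skipA_stop prices f i hf hl)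
    omega
  · have := climbA_ge prices f (skipA prices f i)
    omega

-- main invariant: A's outer loop from index i equals B's fold over the remaining indices
theorem main_inv (prices : List Int) (fuel i : Nat) (acc : List (Int × Int))
    (hf : prices.length - 1 ≤ i + fuel) :
    outerA prices fuel i acc =
      flushB prices ((PySem.List.pyRange ((i : Int) + 1) (prices.length : Int) 1).foldl
        (stepB prices) (acc, none)) := by
  induction fuel generalizing i acc with
  | zero =>
    rw [outerA]
    rw [PySem.List.pyRange_one_eq_nil (by push_cast; omega), List.foldl_nil]
    rfl
  | succ fuel ih =>
    by_cases h : i < prices.length - 1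
    · simp only [outerA]
      rw [if_pos h]
      have hlen : 2 ≤ prices.length := by omega
      set n := prices.length with hn
      set left := skipA prices n i with hleft
      set right := climbA prices n left with hright
      have h_i_le_left : i ≤ left := by rw [hleft]; exact skipA_ge prices n i
      have h_left_le : left ≤ n - 1 := by rw [hleft]; exact skipA_le prices n i (by omega)
      have h_left_le_right : left ≤ right := by rw [hright]; exact climbA_ge prices n left
      have h_right_le : right ≤ n - 1 := by rw [hright]; exact climbA_le prices n left h_left_le
      have h_prog : i < right := by
        have := outer_progress prices n i (by omega) h
        rw [← hleft, ← hright] at this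
        exact this
      have hskip_all := skipA_all prices n i
      rw [← hleft] at hskip_all
      have hclimb_all := climbA_all prices n left
      rw [← hright] at hclimb_all
      clear_value left right
      -- split the index range at left and right
      have hsplit1 : PySem.List.pyRange ((i : Int) + 1) (n : Int) 1 =
          PySem.List.pyRange ((i : Int) + 1) ((left : Int) + 1) 1 ++
            PySem.List.pyRange ((left : Int) + 1) (n : Int) 1 :=
        PySem.List.pyRange_one_append _ _ _ (by push_cast; omega) (by push_cast; omega)
      rw [hsplit1, List.foldl_append]
      rw [skip_seg prices acc i left h_i_le_left hskip_all]
      by_cases hl : left < n - 1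
      · -- skip stopped on an ascent: a run starts at left
        have hasc := skipA_stop prices n i (by omega) (by rw [← hleft]; exact hl)
        rw [← hleft] at hasc
        have h_lt : left < right := by
          have := climbA_gt prices n left (by omega) hl hasc
          rw [← hright] at this
          exact this
        simp only [if_pos h_lt]
        set acc' := acc ++ [(prices.getD left 0, prices.getD right 0)] with hacc'
        -- first climb index sets start := left
        rw [PySem.List.pyRange_one_cons (by push_cast; omega), List.foldl_cons, stepB_natCast]
        simp only [hasc, if_true]
        -- rest of the climb keeps (acc, some left)
        have hsplit2 : PySem.List.pyRange ((left : Int) + 1 + 1) (n : Int) 1 =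
            PySem.List.pyRange (((left+1 : Nat) : Int) + 1) (((right : Nat) : Int) + 1) 1 ++
              PySem.List.pyRange ((right : Int) + 1) (n : Int) 1 := by
          have h1 : ((left : Int) + 1 + 1) = (((left+1 : Nat) : Int) + 1) := by push_cast; ring
          rw [h1]
          exact PySem.List.pyRange_one_append _ _ _ (by push_cast; omega) (by push_cast; omega)
        rw [hsplit2, List.foldl_append]
        rw [climb_seg prices acc (left : Int) (left+1) right (by omega)
          (fun k hk1 hk2 => hclimb_all k (by omega) hk2)]
        -- now state is (acc, some left) before index right+1
        by_cases hr : right < n - 1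
        · -- climb stopped on a descent: index right+1 flushes the run
          have hdesc := climbA_stop prices n left (by omega) (by rw [← hright]; exact hr)
          rw [← hright] at hdesc
          have hnd : ¬ prices.getD right 0 < prices.getD (right+1) 0 := by omega
          rw [PySem.List.pyRange_one_cons (by push_cast; omega), List.foldl_cons, stepB_natCast]
          simp only [hnd, if_false, PySem.List.pyGetD_natCast]
          rw [ih right acc' (by omega)]
          -- RHS: first index right+1 is a no-op from (acc', none)
          rw [PySem.List.pyRange_one_cons (a := (right : Int) + 1) (by push_cast; omega),
            List.foldl_cons, stepB_natCast]
          simp only [hnd, if_false]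
          simp [hacc']
        · -- the run reaches the last index: flushed after the loop
          have hrn : right = n - 1 := by omega
          rw [PySem.List.pyRange_one_eq_nil (by push_cast; omega), List.foldl_nil]
          rw [ih right acc' (by omega)]
          rw [PySem.List.pyRange_one_eq_nil (by push_cast; omega), List.foldl_nil]
          simp only [flushB, PySem.List.pyGetD_natCast]
          rw [pyGetD_last prices (by omega)]
          simp [hacc', hrn]
          rw [hn]
      · -- skip consumed everything up to the end: nothing appended, loop ends
        have hln : left = n - 1 := by omega
        have hrr : right = left := by
          rw [hright]
          obtain ⟨m, hm⟩ : ∃ m, n = m + 1 := ⟨n - 1, by omega⟩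
          rw [hm, climbA]
          have hno : ¬ (left < prices.length - 1 ∧
              prices.getD left 0 < prices.getD (left+1) 0) := by
            intro hcc
            rw [← hn] at hcc
            omega
          rw [if_neg hno]
        simp only [hrr, lt_irrefl, if_false]
        rw [ih left acc (by omega)]
    · -- loop condition false: loop over, range empty
      rw [outerA, if_neg h]
      rw [PySem.List.pyRange_one_eq_nil (by push_cast; omega), List.foldl_nil]
      rfl

-- ===== VERDICT (by name: the statement is the Claim_ definition above) =====
theorem parse_intervals_spec : Claim_equal_parse_intervals := by
  intro prices _
  unfold Spec_parse_intervals
  rw [parse_intervals_alt_eq_flush, parse_intervals]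
  have := main_inv prices prices.length 0 [] (by omega)
  simpa using this
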